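-- pv_equiv track=rewrite | github.com/lsliegeo/advent-of-code-2024 | advent_of_code/day_19.py | part2
-- ===== SOURCE A (Python) =====
-- import functools
--
-- def parse_input(input_data: str) -> tuple[list[str], list[str]]:
--     towels_str, designs_str = input_data.split('\n\n')
--     towels = towels_str.split(', ')
--     designs = designs_str.splitlines()
--     return towels, designs
--
-- def part2(input_data: str) -> int:
--     towels, designs = parse_input(input_data)
--     design_to_towels = {
--         design: [
--             towel
--             for towel in towels
--             if towel in design
--         ]  # fmt: skip
--         for design in designs
--     }  # fmt: skip
--
--     @functools.cache
--     def get_number_combinations(design: str, position: int = 0) -> int: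
--         if position == len(design):
--             return 1
--         elif position > len(design):
--             return 0
--         number_combinations = 0
--         for towel in design_to_towels[design]:
--             if design[position : position + len(towel)] == towel:
--                 number_combinations += get_number_combinations(design, position + len(towel))
--         return number_combinations
--
--     return sum(get_number_combinations(design) for design in designs)
-- ===== SOURCE B (Python) =====
-- def _suffix_ways(design, towels):
--     # ways[k] = number of ways to tile design[k:] with towels; built back-to-front.
--     if not design:
--         return [1]
--     ways = _suffix_ways(design[1:], towels)
--     total = 0
--     for t in towels:
--         if design.startswith(t):
--             total += ways[len(t) - 1]
--     return [total] + ways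
--
--
-- def part2(input_data: str) -> int:
--     towels_str, designs_str = input_data.split('\n\n')
--     towels = towels_str.split(', ')
--     total = 0
--     for design in designs_str.splitlines():
--         total += _suffix_ways(design, towels)[0]
--     return total
-- ===== Notes on version B (the rewrite author's own statement) =====
-- stated objective: alternative
-- what changed: Replaces the per-design filtered-towel dict plus memoized top-down position recursion with a single bottom-up suffix table built back-to-front over the unfiltered towel list (ways[k] = tilings of design[k:]), evaluating each position exactly once.
import Mathlib
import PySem

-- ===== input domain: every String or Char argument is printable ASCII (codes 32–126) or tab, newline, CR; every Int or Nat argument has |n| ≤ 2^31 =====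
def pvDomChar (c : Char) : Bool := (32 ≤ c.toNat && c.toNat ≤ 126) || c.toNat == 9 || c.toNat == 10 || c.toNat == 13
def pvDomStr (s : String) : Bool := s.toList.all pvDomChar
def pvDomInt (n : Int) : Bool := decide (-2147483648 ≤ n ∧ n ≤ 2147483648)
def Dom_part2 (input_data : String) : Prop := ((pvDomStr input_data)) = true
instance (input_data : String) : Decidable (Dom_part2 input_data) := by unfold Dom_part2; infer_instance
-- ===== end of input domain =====

-- B replaces A's memoized top-down recursion (with a per-design filtered towel dict) by a
-- bottom-up suffix table built back-to-front over the unfiltered towel list; same results.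


-- ===== PORT A =====
-- get_number_combinations, with a fuel argument as the totality device (under Pre_ every towel is
-- nonempty, so recursion depth is bounded by design.length - position + 2 and the fuel is never exhausted).
-- design[position:position+len(towel)] is ported as (design.drop position).take towel.length, exact for 0 ≤ position.
def pvGNC (fuel : Nat) (d2t : PySem.Dict (List Char) (List (List Char))) (design : List Char)
    (pos : Nat) : Int :=
  match fuel with
  | 0 => 0
  | fuel + 1 =>
    if pos = design.length then 1
    else if pos > design.length then 0
    else ((d2t.get? design).getD []).foldl
      (fun acc t =>
        if (design.drop pos).take t.length = t then acc + pvGNC fuel d2t design (pos + t.length)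
        else acc) 0

def part2 (input_data : String) : Int :=
  -- parse_input: input_data.split('\n\n') must give exactly two pieces (else Python raises; see Pre_)
  match PySem.Chars.splitOn input_data.toList ['\n', '\n'] with
  | [towels_str, designs_str] =>
    let towels := PySem.Chars.splitOn towels_str [',', ' ']
    let designs := PySem.Chars.splitlines designs_str
    let d2t := designs.foldl
      (fun d design => d.insert design (towels.filter (fun t => PySem.Chars.isIn t design)))
      PySem.Dict.empty
    designs.foldl (fun acc design => acc + pvGNC (design.length + 2) d2t design 0) 0
  | _ => 0

-- ===== PORT B =====
-- _suffix_ways; ways[len(t)-1] is ported with pyGet? (the .getD 0 is never the value Python raises on: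
-- a towel passing startswith fits inside the suffix, so the index is always in range).
def pvWays (design : List Char) (towels : List (List Char)) : List Int :=
  match design with
  | [] => [1]
  | c :: rest =>
    let ways := pvWays rest towels
    (towels.foldl
      (fun acc t =>
        if PySem.Chars.startswith (c :: rest) t then
          acc + (PySem.List.pyGet? ways ((t.length : Int) - 1)).getD 0
        else acc) 0) :: ways

def part2_alt (input_data : String) : Int :=
  match PySem.Chars.splitOn input_data.toList ['\n', '\n'] with
  | towels_str :: designs_str :: [] =>
    let towels := PySem.Chars.splitOn towels_str [',', ' ']
    (PySem.Chars.splitlines designs_str).foldl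
      (fun acc design => acc + (pvWays design towels).headD 0) 0
  | _ :: _ :: _ :: _ => 0
  | [_] => 0
  | [] => 0

-- ===== PRECONDITION & SPEC =====
-- Pre_ excludes exactly the inputs on which A raises: a number of blank-line-separated pieces
-- other than two (ValueError on tuple unpacking), and an empty string in the towel list
-- together with some nonempty design (unbounded recursion, RecursionError).
def Pre_part2 (input_data : String) : Prop :=
  (PySem.Chars.splitOn input_data.toList ['\n', '\n']).length = 2 ∧
  (([] : List Char) ∉ PySem.Chars.splitOn
      ((PySem.Chars.splitOn input_data.toList ['\n', '\n']).headD []) [',', ' '] ∨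
   ∀ d ∈ PySem.Chars.splitlines
      ((PySem.Chars.splitOn input_data.toList ['\n', '\n']).getLastD []), d = [])
instance (input_data : String) : Decidable (Pre_part2 input_data) := by
  unfold Pre_part2; infer_instance

def pvWitness_part2 : String := "r, g, rg\n\nrrg\ngr"

def Spec_part2 (input_data : String) (out : Int) : Prop := out = part2_alt input_data
instance (input_data : String) (out : Int) : Decidable (Spec_part2 input_data out) := by
  unfold Spec_part2; infer_instance

-- ===== CLAIM (what is proved, stated in full; the proofs are below) =====
def Claim_equal_part2 : Prop :=
  ∀ (input_data : String), Dom_part2 input_data → Pre_part2 input_data →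
    Spec_part2 input_data (part2 input_data)

-- ===== LEMMAS AND PROOFS =====

theorem pvWays_length (design : List Char) (towels : List (List Char)) :
    (pvWays design towels).length = design.length + 1 := by
  induction design with
  | nil => rfl
  | cons c rest ih => simp [pvWays, ih]

theorem pvWays_drop (towels : List (List Char)) :
    ∀ (design : List Char) (k : Nat), k ≤ design.length →
      (pvWays design towels).drop k = pvWays (design.drop k) towels := by
  intro design
  induction design with
  | nil =>
    intro k hk
    have : k = 0 := Nat.le_zero.mp hk
    subst this; rfl
  | cons c rest ih =>
    intro k hk
    cases k with
    | zero => rfl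
    | succ k =>
      have : (pvWays (c :: rest) towels).drop (k + 1) = (pvWays rest towels).drop k := by
        simp [pvWays]
      rw [this, ih k (by simpa using hk)]
      rfl

theorem sum_map_filter_eq {α : Type} (l : List α) (p : α → Bool) (g : α → Int)
    (h : ∀ t ∈ l, p t = false → g t = 0) :
    ((l.filter p).map g).sum = (l.map g).sum := by
  induction l with
  | nil => rfl
  | cons x xs ih =>
    have ih' := ih (fun t ht => h t (List.mem_cons_of_mem _ ht))
    by_cases hp : p x = true
    · simp [hp, ih']
    · have hx : g x = 0 := h x (List.mem_cons_self) (by simpa using hp)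
      simp [hp, ih', hx]

theorem get?_foldl_insert_of_not_mem {ν : Type} (l : List (List Char)) (f : List Char → ν)
    (d : PySem.Dict (List Char) ν) (k : List Char) (hk : k ∉ l) :
    (l.foldl (fun d x => d.insert x (f x)) d).get? k = d.get? k := by
  induction l generalizing d with
  | nil => rfl
  | cons x xs ih =>
    have hne : k ≠ x := fun h => hk (h ▸ List.mem_cons_self)
    rw [List.foldl_cons, ih _ (fun h => hk (List.mem_cons_of_mem _ h)),
      PySem.Dict.get?_insert_of_ne _ _ hne]

theorem get?_foldl_insert_of_mem {ν : Type} (l : List (List Char)) (f : List Char → ν)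
    (d : PySem.Dict (List Char) ν) (k : List Char) (hk : k ∈ l) :
    (l.foldl (fun d x => d.insert x (f x)) d).get? k = some (f k) := by
  induction l generalizing d with
  | nil => cases hk
  | cons x xs ih =>
    by_cases hx : k ∈ xs
    · rw [List.foldl_cons, ih _ hx]
    · have hkx : k = x := by
        rcases List.mem_cons.mp hk with h | h
        · exact h
        · exact absurd h hx
      subst hkx
      rw [List.foldl_cons, get?_foldl_insert_of_not_mem _ _ _ _ hx,
        PySem.Dict.get?_insert_self]

theorem foldl_if_add {α : Type} (l : List α) (c : α → Prop) [DecidablePred c]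
    (v : α → Int) (a : Int) :
    l.foldl (fun acc t => if c t then acc + v t else acc) a
      = a + (l.map (fun t => if c t then v t else 0)).sum := by
  induction l generalizing a with
  | nil => simp
  | cons x xs ih =>
    by_cases hx : c x <;> simp [hx, ih, add_assoc]

-- the heart: A's recursion at position pos equals the head of B's suffix table for design.drop pos
theorem pvGNC_eq_ways (towels : List (List Char)) (design : List Char)
    (d2t : PySem.Dict (List Char) (List (List Char)))
    (hd : d2t.get? design = some (towels.filter (fun t => PySem.Chars.isIn t design)))
    (ht : ([] : List Char) ∉ towels) :
    ∀ (fuel pos : Nat), pos ≤ design.length → design.length - pos + 2 ≤ fuel →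
      pvGNC fuel d2t design pos = (pvWays (design.drop pos) towels).headD 0 := by
  intro fuel
  induction fuel with
  | zero => intro pos _ hf; omega
  | succ fuel ih =>
    intro pos hpos hf
    by_cases hEnd : pos = design.length
    · subst hEnd
      simp [pvGNC, List.drop_length, pvWays]
    · have hlt : pos < design.length := lt_of_le_of_ne hpos hEnd
      have hdrop : design.drop pos ≠ [] := by
        intro h
        have := congrArg List.length h
        simp [List.length_drop] at this
        omega
      obtain ⟨c, rest, hcr⟩ := List.exists_cons_of_ne_nil hdrop
      have hrestlen : rest.length = design.length - pos - 1 := by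
        have := congrArg List.length hcr
        simp [List.length_drop] at this
        omega
      -- evaluate A's body
      rw [pvGNC]
      simp only [if_neg hEnd, if_neg (by omega : ¬ pos > design.length), hd, Option.getD_some]
      -- evaluate B's head
      rw [hcr, pvWays]
      simp only [List.headD_cons]
      rw [foldl_if_add, foldl_if_add, zero_add, zero_add]
      have hlencr : (c :: rest).length = design.length - pos := by
        rw [← hcr, List.length_drop]
      rw [sum_map_filter_eq _ _ _ (by
        intro t htl hin
        have hno : ¬ ((c :: rest).take t.length = t) := by
          intro heq
          have hpre : t <+: design.drop pos := by
            rw [hcr, ← heq]; exact List.take_prefix _ _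
          have hinf : t <:+: design :=
            List.IsInfix.trans hpre.isInfix (List.drop_suffix pos design).isInfix
          rw [← PySem.Chars.isIn_iff_infix] at hinf
          simp [hinf] at hin
        simp [hno])]
      apply congrArg
      apply List.map_congr_left
      intro t htl
      -- the two match conditions coincide, and on a match the two values coincide
      have hcond : ((c :: rest).take t.length = t)
          ↔ (PySem.Chars.startswith (c :: rest) t = true) := by
        rw [PySem.Chars.startswith_iff, List.prefix_iff_eq_take, eq_comm]
      by_cases hm : (c :: rest).take t.length = t
      · have hm' : PySem.Chars.startswith (c :: rest) t = true := hcond.mp hm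
        have htne : t ≠ [] := fun h => ht (h ▸ htl)
        have htlen1 : 1 ≤ t.length := by
          cases t with
          | nil => exact absurd rfl htne
          | cons _ _ => simp
        have htfit : t.length ≤ design.length - pos := by
          have := congrArg List.length hm
          simp [List.length_take] at this
          omega
        have hposfit : pos + t.length ≤ design.length := by omega
        rw [if_pos hm, if_pos hm', ih (pos + t.length) hposfit (by omega)]
        -- relate ways-table lookup to the suffix table at pos + |t|
        have hdropdrop : design.drop (pos + t.length) = rest.drop (t.length - 1) := by
          have h1 : design.drop (pos + t.length) = (design.drop pos).drop t.length := by
            rw [List.drop_drop]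
          rw [h1, hcr]
          cases t with
          | nil => exact absurd rfl htne
          | cons a as => simp
        have hidx : (t.length : Int) - 1 = ((t.length - 1 : Nat) : Int) := by
          omega
        rw [hidx, PySem.List.pyGet?_natCast]
        have hidxlt : t.length - 1 < (pvWays rest towels).length := by
          rw [pvWays_length]; omega
        rw [List.getElem?_eq_getElem hidxlt, Option.getD_some]
        have hdp := pvWays_drop towels rest (t.length - 1) (by omega)
        have hhead : (pvWays rest towels)[t.length - 1]
            = ((pvWays rest towels).drop (t.length - 1)).headD 0 := by
          rw [List.headD_eq_head?_getD, List.head?_drop,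
            List.getElem?_eq_getElem hidxlt, Option.getD_some]
        rw [hhead, hdp, hdropdrop]
      · rw [if_neg hm, if_neg (fun h => hm (hcond.mpr h))]

theorem per_design (towels : List (List Char)) (designs : List (List Char))
    (design : List Char) (hmem : design ∈ designs)
    (hok : ([] : List Char) ∉ towels ∨ ∀ d ∈ designs, d = []) :
    pvGNC (design.length + 2)
        (designs.foldl
          (fun d x => d.insert x (towels.filter (fun t => PySem.Chars.isIn t x)))
          PySem.Dict.empty) design 0
      = (pvWays design towels).headD 0 := by
  rcases hok with ht | hall
  · exact pvGNC_eq_ways towels design _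
      (get?_foldl_insert_of_mem designs _ PySem.Dict.empty design hmem) ht
      (design.length + 2) 0 (Nat.zero_le _) (by omega)
  · have hnil : design = [] := hall design hmem
    subst hnil
    rfl

-- ===== VERDICT (by name: the statement is the Claim_ definition above) =====
theorem part2_spec : Claim_equal_part2 := by
  intro input_data _ hpre
  obtain ⟨hlen, hok⟩ := hpre
  unfold Spec_part2 part2 part2_alt
  cases hp : PySem.Chars.splitOn input_data.toList ['\n', '\n'] with
  | nil => simp [hp] at hlen
  | cons towels_str rest =>
    cases rest with
    | nil => simp [hp] at hlen
    | cons designs_str rest2 =>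
      cases rest2 with
      | cons _ _ => simp [hp] at hlen
      | nil =>
        rw [hp] at hok
        simp only [List.headD_cons, List.getLastD] at hok
        apply PySem.List.foldl_congr_mem
        intro acc design hmem
        rw [per_design _ _ design hmem hok]
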